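-- pv_equiv track=rewrite | github.com/Kattusite/linguistics-db | app/lingdb/language.py | compareBitstrings
-- ===== SOURCE A (Python) =====
-- def compareBitstrings(s1, s2):
--     """Given two bitstrings representing the same canonical phoneme set,
--     return the number of phonemes shared between the two (the number of 1s
--     occurring at the same index)"""
--     len1 = len(s1)
--     len2 = len(s2)
--     if (len1 != len2):
--         raise ValueError("An attempt was made to compare phoneme bitstrings" +
--                          " of differing lengths!")
--     matches = 0
--     for i in range(len1):
--         if (s1[i]=="1" and s2[i]=="1"):
--             matches += 1
--     return matches
-- ===== SOURCE B (Python) =====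
-- def compareBitstrings(s1, s2):
--     """Given two bitstrings representing the same canonical phoneme set,
--     return the number of phonemes shared between the two (the number of 1s
--     occurring at the same index)"""
--     if len(s1) != len(s2):
--         raise ValueError("An attempt was made to compare phoneme bitstrings" +
--                          " of differing lengths!")
--     ones1 = {i for i, c in enumerate(s1) if c == "1"}
--     ones2 = {i for i, c in enumerate(s2) if c == "1"}
--     return len(ones1 & ones2)
-- ===== Notes on version B (the rewrite author's own statement) =====
-- stated objective: alternative
-- what changed: Replaces the positional comparison loop with a counter by two index sets built from enumerate and the size of their intersection.
import Mathlib
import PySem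

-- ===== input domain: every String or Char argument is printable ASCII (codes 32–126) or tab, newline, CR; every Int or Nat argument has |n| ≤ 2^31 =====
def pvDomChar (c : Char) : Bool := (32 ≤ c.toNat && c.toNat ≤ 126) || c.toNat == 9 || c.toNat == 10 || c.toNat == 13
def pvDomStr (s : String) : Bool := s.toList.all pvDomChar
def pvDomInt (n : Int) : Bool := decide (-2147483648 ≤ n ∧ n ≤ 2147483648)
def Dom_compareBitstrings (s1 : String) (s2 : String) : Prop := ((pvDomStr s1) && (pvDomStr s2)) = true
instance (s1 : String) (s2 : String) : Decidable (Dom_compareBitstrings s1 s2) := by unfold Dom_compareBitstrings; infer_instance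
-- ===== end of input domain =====

-- B replaces A's positional counting loop by two index sets (from enumerate) and the
-- size of their intersection; same cost, different data structure (objective: alternative).


-- ===== PORT A =====
-- literal port of A: length check, then a counting loop over range(len1);
-- on the ValueError branch (excluded by Pre_) the port returns 0.
def compareBitstrings (s1 : String) (s2 : String) : Int :=
  let len1 := PySem.Str.len s1
  let len2 := PySem.Str.len s2
  if len1 ≠ len2 then 0  -- Python raises ValueError here; outside Pre_
  else
    (PySem.List.pyRange 0 len1 1).foldl
      (fun acc i =>
        if PySem.Str.pyGet? s1 i == some '1' && PySem.Str.pyGet? s2 i == some '1'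
        then acc + 1 else acc) 0

-- ===== PORT B =====
-- literal port of B: same length check, then two index sets and the size of their intersection.
def compareBitstrings_alt (s1 : String) (s2 : String) : Int :=
  if PySem.Str.len s1 ≠ PySem.Str.len s2 then 0  -- Python raises ValueError here; outside Pre_
  else
    let ones1 : PySem.Set Int :=
      PySem.Set.ofList (((PySem.List.enumerate s1.toList 0).filter (fun p => p.2 == '1')).map (·.1))
    let ones2 : PySem.Set Int :=
      PySem.Set.ofList (((PySem.List.enumerate s2.toList 0).filter (fun p => p.2 == '1')).map (·.1))
    PySem.Set.len (PySem.Set.inter ones1 ones2)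

-- ===== PRECONDITION & SPEC =====
-- Pre_ excludes exactly the inputs of differing length, on which A raises ValueError.
def Pre_compareBitstrings (s1 : String) (s2 : String) : Prop :=
  PySem.Str.len s1 = PySem.Str.len s2
instance (s1 : String) (s2 : String) : Decidable (Pre_compareBitstrings s1 s2) := by
  unfold Pre_compareBitstrings; infer_instance
def pvWitness_compareBitstrings : String × String := ("1011", "0011")

def Spec_compareBitstrings (s1 : String) (s2 : String) (out : Int) : Prop := out = compareBitstrings_alt s1 s2
instance (s1 : String) (s2 : String) (out : Int) : Decidable (Spec_compareBitstrings s1 s2 out) := by unfold Spec_compareBitstrings; infer_instance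

-- ===== CLAIM (what is proved, stated in full; the proofs are below) =====
def Claim_equal_compareBitstrings : Prop := ∀ (s1 : String) (s2 : String), Dom_compareBitstrings s1 s2 → Pre_compareBitstrings s1 s2 → Spec_compareBitstrings s1 s2 (compareBitstrings s1 s2)

-- ===== LEMMAS AND PROOFS =====

-- a counting foldl is countP
lemma foldl_count (f : Int → Bool) (l : List Int) (c : Int) :
    l.foldl (fun m i => if f i then m + 1 else m) c = c + l.countP f := by
  induction l generalizing c with
  | nil => simp
  | cons x xs ih =>
    simp only [List.foldl_cons, List.countP_cons, ih]
    by_cases h : f x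
    · simp [h]; omega
    · simp [h]

-- Set.ofList is the identity on a Nodup list
lemma foldl_add_nodup {α : Type} [BEq α] [LawfulBEq α] (xs acc : List α)
    (h : (acc ++ xs).Nodup) : xs.foldl PySem.Set.add acc = acc ++ xs := by
  induction xs generalizing acc with
  | nil => simp
  | cons x xs ih =>
    have hx : acc.contains x = false := by
      simp only [List.contains_eq_mem, decide_eq_false_iff_not]
      intro hmem
      exact (List.disjoint_of_nodup_append h) hmem (by simp)
    have : PySem.Set.add acc x = acc ++ [x] := by
      simp only [PySem.Set.add, PySem.Set.contains, hx]
      simp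
    rw [List.foldl_cons, this, ih (acc ++ [x]) (by simpa using h)]
    simp

lemma ofList_nodup {α : Type} [BEq α] [LawfulBEq α] (xs : List α) (h : xs.Nodup) :
    PySem.Set.ofList xs = xs := by
  rw [PySem.Set.ofList_eq_foldl]
  simpa using foldl_add_nodup xs [] (by simpa using h)

-- the index set of a char list, as a filtered range
lemma idx_eq_filter (l : List Char) :
    ((PySem.List.enumerate l 0).filter (fun p => p.2 == '1')).map (·.1)
      = (PySem.List.pyRange 0 (l.length : Int) 1).filter
          (fun j => PySem.List.pyGetD l j ' ' == '1') := by
  rw [show PySem.List.enumerate l 0 = PySem.List.enumerate l from rfl,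
      PySem.List.enumerate_eq_map_pyRange l ' ', List.filter_map, List.map_map]
  simp [Function.comp_def, PySem.List.len]

lemma nodup_idx (l : List Char) :
    (((PySem.List.enumerate l 0).filter (fun p => p.2 == '1')).map (·.1)).Nodup := by
  rw [idx_eq_filter]
  exact (PySem.List.nodup_pyRange_one 0 l.length).filter _

theorem compareBitstrings_spec : Claim_equal_compareBitstrings := by
  intro s1 s2 _ hpre
  unfold Pre_compareBitstrings at hpre
  unfold Spec_compareBitstrings compareBitstrings compareBitstrings_alt
  simp only [hpre, ne_eq, not_true_eq_false, if_false]
  rw [foldl_count, ofList_nodup _ (nodup_idx s1.toList), ofList_nodup _ (nodup_idx s2.toList),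
      idx_eq_filter, idx_eq_filter]
  simp only [PySem.Str.len_eq] at hpre ⊢
  have hn : s1.toList.length = s2.toList.length := by exact_mod_cast hpre
  simp only [PySem.Set.len, PySem.Set.inter, List.filter_filter,
    ← List.countP_eq_length_filter, Int.zero_add]
  simp only [hn]
  congr 1
  apply List.countP_congr
  intro i hi
  obtain ⟨h0, hlt⟩ := PySem.List.mem_pyRange_one.mp hi
  obtain ⟨k, rfl⟩ : ∃ k : ℕ, i = (k : Int) := ⟨i.toNat, (Int.toNat_of_nonneg h0).symm⟩
  have hk2 : k < s2.toList.length := by exact_mod_cast hlt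
  have hk1 : k < s1.toList.length := hn ▸ hk2
  have hk2' : k < s2.length := by simpa using hk2
  simp [List.getElem?_eq_getElem hk1, hk2',
    List.contains_eq_mem, List.mem_filter, PySem.List.mem_pyRange_one]
  tauto
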